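-- pv_equiv track=rewrite | github.com/BeatriceB123/Checkers | dame_tabla_mica.py | determine_coordinates_box
-- ===== SOURCE A (Python) =====
-- BOXSIZE = 90        # size of box height & width in pixels
--
-- NRB = 4             # number of boxes
--
-- def determine_coordinates_box(e):
--     cari = NRB
--     carj = NRB
--     if e[0] and e[1] in range(NRB * BOXSIZE + 1):  # in square
--         for k in range(NRB, 0, -1):
--             if e[0] < k * BOXSIZE:
--                 carj = k - 1
--             if e[1] < k * BOXSIZE:
--                 cari = k - 1
--         return cari, carj
--     return None
-- ===== SOURCE B (Python) =====
-- BOXSIZE = 90        # size of box height & width in pixels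
--
-- NRB = 4             # number of boxes
--
-- def determine_coordinates_box(e):
--     # closed-form: integer division instead of the countdown scan
--     if e[0] and 0 <= e[1] <= NRB * BOXSIZE:
--         cari = e[1] // BOXSIZE
--         carj = min(max(e[0] // BOXSIZE, 0), NRB)
--         return cari, carj
--     return None
-- ===== Notes on version B (the rewrite author's own statement) =====
-- stated objective: simpler
-- what changed: Replaces the fixed countdown loop over k=NRB..1 with closed-form integer division (e[1]//BOXSIZE, and e[0]//BOXSIZE clamped to [0,NRB]).
import Mathlib
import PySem

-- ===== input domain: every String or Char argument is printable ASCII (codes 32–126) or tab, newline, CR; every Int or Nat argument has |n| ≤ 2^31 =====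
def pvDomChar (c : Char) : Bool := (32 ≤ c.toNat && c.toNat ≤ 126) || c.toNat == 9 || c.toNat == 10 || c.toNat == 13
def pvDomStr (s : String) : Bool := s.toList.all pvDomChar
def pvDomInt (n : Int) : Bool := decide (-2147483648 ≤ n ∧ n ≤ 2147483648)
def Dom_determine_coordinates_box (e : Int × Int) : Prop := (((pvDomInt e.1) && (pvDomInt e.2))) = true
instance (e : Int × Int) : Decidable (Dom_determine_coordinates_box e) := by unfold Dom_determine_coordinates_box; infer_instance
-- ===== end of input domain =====

-- B replaces A's countdown loop with closed-form integer division (same values; objective: simpler).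

-- ===== PORT A =====
-- literal port: 'e[0] and e[1] in range(NRB*BOXSIZE+1)' is e.1 ≠ 0 ∧ 0 ≤ e.2 ∧ e.2 < 4*90+1
-- (int truthiness; int membership in range(0, 361))
def determine_coordinates_box (e : Int × Int) : Option (Int × Int) :=
  let cari : Int := 4
  let carj : Int := 4
  if e.1 ≠ 0 ∧ (0 ≤ e.2 ∧ e.2 < 4 * 90 + 1) then
    let p := (PySem.List.pyRange 4 0 (-1)).foldl
      (fun (p : Int × Int) (k : Int) =>
        let carj := if e.1 < k * 90 then k - 1 else p.2
        let cari := if e.2 < k * 90 then k - 1 else p.1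
        (cari, carj)) (cari, carj)
    some (p.1, p.2)
  else
    none

-- ===== PORT B =====
def determine_coordinates_box_alt (e : Int × Int) : Option (Int × Int) :=
  if e.1 ≠ 0 ∧ (0 ≤ e.2 ∧ e.2 ≤ 4 * 90) then
    let cari := PySem.Int.floordiv e.2 90
    let carj := min (max (PySem.Int.floordiv e.1 90) 0) 4
    some (cari, carj)
  else
    none

-- ===== PRECONDITION & SPEC =====
def Spec_determine_coordinates_box (e : Int × Int) (out : Option (Int × Int)) : Prop := out = determine_coordinates_box_alt e
instance (e : Int × Int) (out : Option (Int × Int)) : Decidable (Spec_determine_coordinates_box e out) := by unfold Spec_determine_coordinates_box; infer_instance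

-- ===== CLAIM (what is proved, stated in full; the proofs are below) =====
def Claim_equal_determine_coordinates_box : Prop := ∀ (e : Int × Int), Dom_determine_coordinates_box e → Spec_determine_coordinates_box e (determine_coordinates_box e)

-- ===== LEMMAS AND PROOFS =====

-- ===== VERDICT (by name: the statement is the Claim_ definition above) =====
theorem determine_coordinates_box_spec : Claim_equal_determine_coordinates_box := by
  intro e _
  unfold Spec_determine_coordinates_box determine_coordinates_box determine_coordinates_box_alt
  by_cases h : e.1 ≠ 0 ∧ (0 ≤ e.2 ∧ e.2 < 4 * 90 + 1)
  · have h' : e.1 ≠ 0 ∧ (0 ≤ e.2 ∧ e.2 ≤ 4 * 90) := ⟨h.1, h.2.1, by omega⟩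
    rw [if_pos h, if_pos h']
    have hr : PySem.List.pyRange 4 0 (-1) = [4, 3, 2, 1] := by decide
    rw [hr]
    simp only [List.foldl]
    have h1 := PySem.Int.floordiv_eq_ediv_of_pos (a := e.1) (b := 90) (by omega)
    have h2 := PySem.Int.floordiv_eq_ediv_of_pos (a := e.2) (b := 90) (by omega)
    rw [h1, h2, Option.some.injEq, Prod.ext_iff]
    constructor <;> (dsimp only; split_ifs <;> omega)
  · have h' : ¬ (e.1 ≠ 0 ∧ (0 ≤ e.2 ∧ e.2 ≤ 4 * 90)) := by
      intro hc; exact h ⟨hc.1, hc.2.1, by omega⟩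
    rw [if_neg h, if_neg h']
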